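-- pv_equiv track=rewrite | github.com/janndemond/python-getting-started | hello/statistical_processing.py | valueCounter
-- ===== SOURCE A (Python) =====
-- def valueCounter(num):
--     """Counts the number of values in a list. Missing values are not counted."""
--     numberOfNumbers = 0
--     for t in num:
--         for x in range(1, 2): #additional for loop that is only executed if the respective input value is not empty
--             if t == '':
--                 break
--             else:
--                 numberOfNumbers = numberOfNumbers + 1 #increase by 1 whenever an element is non-empty
--
--     value = numberOfNumbers
--     return value
-- ===== SOURCE B (Python) =====
-- def valueCounter(num):
--     """Counts the number of values in a list. Missing values are not counted."""
--     return len(num) - num.count('')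
-- ===== Notes on version B (the rewrite author's own statement) =====
-- stated objective: simpler
-- what changed: B counts the complement: it subtracts the number of empty-string elements (num.count('')) from len(num) instead of looping (with a pointless inner range loop) and incrementing a counter for each non-empty element.
import Mathlib
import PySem

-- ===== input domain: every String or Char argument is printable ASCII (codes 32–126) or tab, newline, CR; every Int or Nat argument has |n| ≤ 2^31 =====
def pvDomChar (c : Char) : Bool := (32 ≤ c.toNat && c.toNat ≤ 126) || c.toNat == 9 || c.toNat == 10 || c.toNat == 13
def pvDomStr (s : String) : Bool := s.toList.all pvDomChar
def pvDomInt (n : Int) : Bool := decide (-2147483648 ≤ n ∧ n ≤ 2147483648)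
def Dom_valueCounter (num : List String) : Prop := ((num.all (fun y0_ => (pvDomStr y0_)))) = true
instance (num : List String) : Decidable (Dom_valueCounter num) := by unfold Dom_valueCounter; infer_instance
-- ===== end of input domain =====

-- ===== PORT A =====
def valueCounter (num : List String) : Int :=
  let numberOfNumbers : Int :=
    num.foldl
      (fun acc t =>
        -- inner 'for x in range(1, 2)' with break: fold over the range with a broken-flag
        ((PySem.List.pyRange 1 2 1).foldl
          (fun (s : Int × Bool) _ =>
            if s.2 then s
            else if t == "" then (s.1, true)
            else (s.1 + 1, s.2))
          (acc, false)).1)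
      0
  let value := numberOfNumbers
  value

-- ===== PORT B =====
-- B: len(num) - num.count('')
def valueCounter_alt (num : List String) : Int :=
  (num.length : Int) - (PySem.List.count num "" : Int)

-- ===== PRECONDITION & SPEC =====
def Spec_valueCounter (num : List String) (out : Int) : Prop := out = valueCounter_alt num
instance (num : List String) (out : Int) : Decidable (Spec_valueCounter num out) := by unfold Spec_valueCounter; infer_instance

-- ===== CLAIM (what is proved, stated in full; the proofs are below) =====
def Claim_equal_valueCounter : Prop := ∀ (num : List String), Dom_valueCounter num → Spec_valueCounter num (valueCounter num)

-- ===== LEMMAS AND PROOFS =====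
theorem valueCounter_foldl (num : List String) (a : Int) :
    num.foldl
      (fun acc t =>
        ((PySem.List.pyRange 1 2 1).foldl
          (fun (s : Int × Bool) _ =>
            if s.2 then s
            else if t == "" then (s.1, true)
            else (s.1 + 1, s.2))
          (acc, false)).1)
      a
    = a + (num.length : Int) - (num.count "" : Int) := by
  induction num generalizing a with
  | nil => simp
  | cons h t ih =>
    simp only [List.foldl_cons, List.length_cons, List.count_cons, ih]
    by_cases hh : h = ""
    · subst hh; simp [PySem.List.pyRange]; ring
    · simp [PySem.List.pyRange, hh]; ring

-- ===== VERDICT (by name: the statement is the Claim_ definition above) =====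
theorem valueCounter_spec : Claim_equal_valueCounter := by
  intro num _
  unfold Spec_valueCounter valueCounter valueCounter_alt
  simp only [valueCounter_foldl, PySem.List.count_eq]
  ring
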